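-- pv_equiv track=rewrite | github.com/MaxTechniche/Aoc-Day-Downloader | 2019/Day_08/day8_Space_Image_Format.py | make_layers
-- ===== SOURCE A (Python) =====
-- def make_layers(input_, w, h):
--     layers_ = []
--     current_layer = []
--     for num in range(0, len(input_), w):
--         current_layer.append(input_[num:num+w][:])
--         if len(current_layer) == h:
--             layers_.append(current_layer[:])
--             current_layer.clear()
--     return layers_
-- ===== SOURCE B (Python) =====
-- def make_layers(input_, w, h):
--     rows = [input_[i:i+w] for i in range(0, len(input_), w)]
--     n = len(rows) // h
--     return [rows[k*h:(k+1)*h] for k in range(n)]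
-- ===== Notes on version B (the rewrite author's own statement) =====
-- stated objective: simpler
-- what changed: A's single interleaved loop with a running current-layer accumulator and an in-place counter check is replaced by two independent passes: first cut the input into rows by a slice comprehension, then emit len(rows)//h complete layers by arithmetic index slicing.
-- outside the precondition, e.g. on make_layers([1, 2], 1, 0): A returns [], B raises ZeroDivisionError
import Mathlib
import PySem

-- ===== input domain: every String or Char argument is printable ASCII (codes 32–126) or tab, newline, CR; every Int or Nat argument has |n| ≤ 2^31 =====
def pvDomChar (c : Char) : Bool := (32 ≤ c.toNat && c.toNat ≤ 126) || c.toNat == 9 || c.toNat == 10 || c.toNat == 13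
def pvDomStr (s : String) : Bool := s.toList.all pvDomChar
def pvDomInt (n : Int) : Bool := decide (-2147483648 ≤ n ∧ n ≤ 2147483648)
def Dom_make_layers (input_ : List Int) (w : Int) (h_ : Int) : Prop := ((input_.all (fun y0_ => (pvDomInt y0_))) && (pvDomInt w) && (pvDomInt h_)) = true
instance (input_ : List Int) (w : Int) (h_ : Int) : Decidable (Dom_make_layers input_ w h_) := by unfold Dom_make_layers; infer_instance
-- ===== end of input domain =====

-- B replaces A's single interleaved loop with a running current-layer accumulator by two
-- independent passes (cut the rows, then group them by arithmetic index slicing); objective: simpler.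

-- ===== PORT A =====
def make_layers (input_ : List Int) (w : Int) (h_ : Int) : List (List (List Int)) :=
  ((PySem.List.pyRange 0 (input_.length : Int) w).foldl
    (fun (s : List (List (List Int)) × List (List Int)) num =>
      let cur := s.2 ++ [PySem.List.slice input_ (some num) (some (num + w))]
      if (cur.length : Int) = h_ then (s.1 ++ [cur], []) else (s.1, cur))
    ([], [])).1

-- ===== PORT B =====
def make_layers_alt (input_ : List Int) (w : Int) (h_ : Int) : List (List (List Int)) :=
  let rows := (PySem.List.pyRange 0 (input_.length : Int) w).map
      (fun i => PySem.List.slice input_ (some i) (some (i + w)))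
  let n := PySem.Int.floordiv (rows.length : Int) h_
  (PySem.List.pyRange 0 n 1).map
    (fun k => PySem.List.slice rows (some (k * h_)) (some ((k + 1) * h_)))

-- ===== PRECONDITION & SPEC =====
-- Pre_ excludes w = 0 (A's range(0, len, 0) raises ValueError) and h = 0, where A returns []
-- but B's len(rows)//h raises ZeroDivisionError (layer height 0 is outside the natural domain).
def Pre_make_layers (input_ : List Int) (w : Int) (h_ : Int) : Prop := w ≠ 0 ∧ h_ ≠ 0
instance (input_ : List Int) (w : Int) (h_ : Int) : Decidable (Pre_make_layers input_ w h_) := by unfold Pre_make_layers; infer_instance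
def pvWitness_make_layers : List Int × Int × Int := ([1, 2, 3, 4, 5, 6, 7], 2, 2)

def Spec_make_layers (input_ : List Int) (w : Int) (h_ : Int) (out : List (List (List Int))) : Prop := out = make_layers_alt input_ w h_
instance (input_ : List Int) (w : Int) (h_ : Int) (out : List (List (List Int))) : Decidable (Spec_make_layers input_ w h_ out) := by unfold Spec_make_layers; infer_instance

-- ===== CLAIM (what is proved, stated in full; the proofs are below) =====
def Claim_equal_make_layers : Prop := ∀ (input_ : List Int) (w : Int) (h_ : Int), Dom_make_layers input_ w h_ → Pre_make_layers input_ w h_ → Spec_make_layers input_ w h_ (make_layers input_ w h_)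

-- ===== LEMMAS AND PROOFS =====

-- the list of complete chunks of size h' of a list
def pvGroups {α : Type} (h' : Nat) (xs : List α) : List (List α) :=
  if h : 0 < h' ∧ h' ≤ xs.length then xs.take h' :: pvGroups h' (xs.drop h') else []
termination_by xs.length
decreasing_by simp; omega

-- A's fold over the row list computes the chunk grouping
theorem pvFoldA {α : Type} (h' : Nat) (hp : 0 < h') :
    ∀ (rows : List α) (acc : List (List α)) (cur : List α), cur.length < h' →
    (rows.foldl
      (fun (s : List (List α) × List α) r =>
        let c := s.2 ++ [r]
        if (c.length : Int) = (h' : Int) then (s.1 ++ [c], []) else (s.1, c))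
      (acc, cur)).1 = acc ++ pvGroups h' (cur ++ rows) := by
  intro rows
  induction rows with
  | nil =>
    intro acc cur hc
    rw [pvGroups, dif_neg (by simp; omega)]
    simp
  | cons r rs ih =>
    intro acc cur hc
    simp only [List.foldl_cons]
    by_cases he : (((cur ++ [r]).length : Int) = (h' : Int))
    · have hlen : (cur ++ [r]).length = h' := by exact_mod_cast he
      simp only [he, if_pos]
      rw [ih (acc ++ [cur ++ [r]]) [] hp]
      simp only [List.nil_append]
      have hle : h' ≤ (cur ++ (r :: rs)).length := by
        simp at hlen ⊢; omega
      have hsplit : cur ++ (r :: rs) = (cur ++ [r]) ++ rs := by simp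
      conv_rhs => rw [pvGroups]
      rw [dif_pos ⟨hp, hle⟩, hsplit, ← hlen, List.take_left, List.drop_left]
      simp
    · have hlen : (cur ++ [r]).length ≠ h' := fun h => he (by exact_mod_cast h)
      have hlt : (cur ++ [r]).length < h' := by simp at hlen ⊢; omega
      simp only [he, if_neg, not_false_iff]
      rw [ih acc (cur ++ [r]) hlt]
      simp

-- B's arithmetic index slicing computes the chunk grouping
theorem pvMapB {α : Type} (h' : Nat) (hp : 0 < h') :
    ∀ (n : Nat) (rows : List α), rows.length ≤ n →
    (List.range (rows.length / h')).map (fun j => (rows.drop (j * h')).take h')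
      = pvGroups h' rows := by
  intro n
  induction n with
  | zero =>
    intro rows hn
    have h0 : rows.length = 0 := Nat.le_zero.mp hn
    rw [pvGroups, dif_neg (by omega)]
    simp [Nat.div_eq_of_lt (by omega : rows.length < h')]
  | succ n ih =>
    intro rows hn
    rw [pvGroups]
    by_cases hle : h' ≤ rows.length
    · rw [dif_pos ⟨hp, hle⟩]
      have hdiv : rows.length / h' = (rows.drop h').length / h' + 1 := by
        rw [List.length_drop, ← Nat.div_eq_sub_div hp hle]
      rw [hdiv, List.range_succ_eq_map, List.map_cons, List.map_map]
      have heq : ((fun j => (rows.drop (j * h')).take h') ∘ Nat.succ)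
          = fun j => ((rows.drop h').drop (j * h')).take h' := by
        funext j
        simp only [Function.comp, List.drop_drop]
        congr 2
        rw [Nat.succ_mul, Nat.add_comm]
      rw [heq, ih (rows.drop h') (by simp; omega)]
      simp
    · rw [dif_neg (by omega)]
      simp [Nat.div_eq_of_lt (by omega : rows.length < h')]

-- floor division of a nonnegative number by a negative one is nonpositive
theorem pvFloordiv_nonpos (L h_ : Int) (hL : 0 ≤ L) (hh : h_ < 0) :
    PySem.Int.floordiv L h_ ≤ 0 := by
  by_contra hlt
  have hmod := PySem.Int.mod_neg_bounds L hh
  have := PySem.Int.floordiv_mul_add_mod L h_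
  nlinarith [hmod.1, hmod.2]

-- ===== VERDICT (by name: the statement is the Claim_ definition above) =====
theorem make_layers_spec : Claim_equal_make_layers := by
  intro input_ w h_ _hdom hpre
  obtain ⟨hw, hh⟩ := hpre
  unfold Spec_make_layers make_layers make_layers_alt
  dsimp only
  rw [← List.foldl_map (f := fun i => PySem.List.slice input_ (some i) (some (i + w)))
       (g := fun (s : List (List (List Int)) × List (List Int)) r =>
          let c := s.2 ++ [r]
          if (c.length : Int) = h_ then (s.1 ++ [c], []) else (s.1, c))]
  set rows := (PySem.List.pyRange 0 (input_.length : Int) w).map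
      (fun i => PySem.List.slice input_ (some i) (some (i + w))) with hrows
  rcases lt_or_gt_of_ne hh with hneg | hpos
  · -- h_ < 0: A never completes a layer; B's floor division is nonpositive
    have hA : ∀ (rs : List (List Int)) (acc : List (List (List Int))) (cur : List (List Int)),
        (rs.foldl
          (fun (s : List (List (List Int)) × List (List Int)) r =>
            let c := s.2 ++ [r]
            if (c.length : Int) = h_ then (s.1 ++ [c], []) else (s.1, c))
          (acc, cur)).1 = acc := by
      intro rs
      induction rs with
      | nil => intro acc cur; rfl
      | cons r t ih =>
        intro acc cur
        simp only [List.foldl_cons]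
        rw [if_neg (by omega)]
        exact ih acc (cur ++ [r])
    rw [hA, PySem.List.pyRange_one_eq_nil
          (pvFloordiv_nonpos (rows.length : Int) h_ (by positivity) hneg)]
    simp
  · -- h_ > 0
    obtain ⟨h', rfl⟩ : ∃ h' : Nat, h_ = (h' : Int) := ⟨h_.toNat, (Int.toNat_of_nonneg (le_of_lt hpos)).symm⟩
    have hp : 0 < h' := by exact_mod_cast hpos
    rw [pvFoldA h' hp rows [] [] hp, List.nil_append, List.nil_append]
    rw [← pvMapB h' hp rows.length rows le_rfl]
    rw [PySem.Int.floordiv_natCast rows.length h', PySem.List.pyRange_one, List.map_map]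
    apply List.map_congr_left
    intro j _
    simp only [Function.comp]
    have h2 : ((0 : Int) + (j : Int)) * (h' : Int) = ((j * h' : Nat) : Int) := by push_cast; ring
    have h3 : ((0 : Int) + (j : Int) + 1) * (h' : Int) = (((j + 1) * h' : Nat) : Int) := by push_cast [Nat.add_mul]; ring
    rw [h2, h3, PySem.List.slice_natCast]
    congr 1
    rw [Nat.add_mul]
    omega
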